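-- pv_equiv track=rewrite | github.com/rcm/AASB2425 | code.py | get_prots
-- ===== SOURCE A (Python) =====
-- def get_prots(amino):
--     inside_prot = False
--     prots = []
--     prot = ''
--
--     for aa in amino:
--         if aa == 'M':
--             inside_prot = True
--
--         if aa == '_':
--             if inside_prot:
--                 prots.append(prot + '_')
--
--             inside_prot = False
--             prot = ''
--
--         if inside_prot:
--             prot += aa
--     return prots
-- ===== SOURCE B (Python) =====
-- def get_prots(amino):
--     prots = []
--     rest = amino
--     while True:
--         j = rest.find('_')
--         if j == -1:
--             return prots
--         seg = rest[:j]
--         k = seg.find('M')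
--         if k != -1:
--             prots.append(seg[k:] + '_')
--         rest = rest[j + 1:]
-- ===== Notes on version B (the rewrite author's own statement) =====
-- stated objective: faster
-- what changed: Replaced A's per-character flag-machine loop (inside_prot flag plus a string accumulator grown one char at a time) with a boundary-and-slice loop: str.find locates each separator, the segment is sliced out, and the protein is a single slice from the segment's first start marker.
import Mathlib
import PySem

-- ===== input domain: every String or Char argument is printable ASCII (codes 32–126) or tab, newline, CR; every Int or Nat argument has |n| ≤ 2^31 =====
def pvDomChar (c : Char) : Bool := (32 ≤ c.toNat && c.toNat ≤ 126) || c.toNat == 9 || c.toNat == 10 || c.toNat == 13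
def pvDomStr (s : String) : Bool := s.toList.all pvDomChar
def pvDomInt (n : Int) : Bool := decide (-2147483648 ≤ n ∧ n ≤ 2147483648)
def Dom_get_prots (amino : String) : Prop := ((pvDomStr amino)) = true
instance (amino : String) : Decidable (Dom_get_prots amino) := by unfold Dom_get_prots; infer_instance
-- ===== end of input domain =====

-- B replaces A's char-by-char flag machine with a find-boundary-and-slice loop (measured faster in a timing run; same return value).

-- ===== PORT A =====
-- one iteration of A's for-loop: the three ifs, in order, on state (inside_prot, prots, prot)
def stepA (s : Bool × List String × String) (aa : Char) : Bool × List String × String :=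
  let inside := if aa = 'M' then true else s.1
  let t := if aa = '_' then ((false : Bool), (if inside then s.2.1 ++ [s.2.2 ++ "_"] else s.2.1), "") else (inside, s.2.1, s.2.2)
  if t.1 then (t.1, t.2.1, t.2.2.push aa) else t

def get_prots (amino : String) : List String :=
  (amino.toList.foldl stepA (false, [], "")).2.1

-- ===== PORT B =====
-- termination fact for B's while loop: each round drops past the found '_'
theorem bgo_dec (rest : List Char) (j : Int) (hj : PySem.Chars.find rest ['_'] = j)
    (h : ¬ j = -1) : (PySem.List.slice rest (some (j + 1)) none).length < rest.length := by
  have h0 : -1 ≤ j := hj ▸ PySem.Chars.neg_one_le_find rest ['_']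
  have hfind : PySem.Chars.find rest ['_'] ≠ -1 := by rw [hj]; exact h
  have hin : (['_'] : List Char) <:+: rest := (PySem.Chars.find_ne_neg_one_iff rest ['_']).mp hfind
  have hne : rest ≠ [] := by
    intro hnil; subst hnil
    rcases hin with ⟨s, t, hst⟩; simp at hst
  rw [PySem.List.slice_from rest (a := j + 1) (by omega)]
  have hpos : 0 < rest.length := List.length_pos_iff.mpr hne
  have h1 : 1 ≤ (j + 1).toNat := by omega
  rw [List.length_drop]; omega

-- port of B's while loop, on the code points (string find/slice go through .toList; exact)
def bgo (rest : List Char) : List String :=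
  let j := PySem.Chars.find rest ['_']
  if h : j = -1 then []
  else
    let seg := PySem.List.slice rest none (some j)
    let k := PySem.Chars.find seg ['M']
    (if k = -1 then [] else [String.ofList (PySem.List.slice seg (some k) none) ++ "_"]) ++
      bgo (PySem.List.slice rest (some (j + 1)) none)
termination_by rest.length
decreasing_by exact bgo_dec rest _ rfl h

def get_prots_alt (amino : String) : List String := bgo amino.toList

-- ===== PRECONDITION & SPEC =====
def Spec_get_prots (amino : String) (out : List String) : Prop := out = get_prots_alt amino
instance (amino : String) (out : List String) : Decidable (Spec_get_prots amino out) := by unfold Spec_get_prots; infer_instance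

-- ===== CLAIM (what is proved, stated in full; the proofs are below) =====
def Claim_equal_get_prots : Prop := ∀ (amino : String), Dom_get_prots amino → Spec_get_prots amino (get_prots amino)

-- ===== LEMMAS AND PROOFS =====

-- A's loop state collapses to the pending protein characters p (inside_prot ↔ p ≠ [])
def stA (p : List Char) (c : Char) : List Char :=
  if c = 'M' then p ++ [c] else if p = [] then [] else p ++ [c]

-- abstract run of A's machine from pending state p
def G (p : List Char) : List Char → List String
  | [] => []
  | c :: cs =>
      if c = '_' then (if p = [] then [] else [String.ofList p ++ "_"]) ++ G [] cs
      else G (stA p c) cs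

theorem push_mk (p : List Char) (c : Char) : (String.ofList p).push c = String.ofList (p ++ [c]) := by
  apply String.toList_injective; simp

theorem foldA (cs : List Char) : ∀ (p : List Char) (acc : List String),
    (cs.foldl stepA (decide (p ≠ []), acc, String.ofList p)).2.1 = acc ++ G p cs := by
  induction cs with
  | nil => intro p acc; simp [G]
  | cons c cs ih =>
    intro p acc
    by_cases hM : c = 'M'
    · subst hM
      have : stepA (decide (p ≠ []), acc, String.ofList p) 'M' = (decide ((p ++ ['M']) ≠ []), acc, String.ofList (p ++ ['M'])) := by
        simp [stepA, push_mk]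
      rw [List.foldl_cons, this, ih]
      simp [G, stA]
    · by_cases hU : c = '_'
      · subst hU
        have : stepA (decide (p ≠ []), acc, String.ofList p) '_' =
            (decide (([] : List Char) ≠ []), (if p = [] then acc else acc ++ [String.ofList p ++ "_"]), String.ofList []) := by
          by_cases hp : p = [] <;> simp [stepA, hp]
        rw [List.foldl_cons, this, ih]
        by_cases hp : p = [] <;> simp [G, hp]
      · by_cases hp : p = []
        · subst hp
          have : stepA (decide (([] : List Char) ≠ []), acc, String.ofList []) c = (decide (([] : List Char) ≠ []), acc, String.ofList []) := by
            simp [stepA, hM, hU]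
          rw [List.foldl_cons, this, ih]
          simp [G, stA, hM, hU]
        · have : stepA (decide (p ≠ []), acc, String.ofList p) c = (decide ((p ++ [c]) ≠ []), acc, String.ofList (p ++ [c])) := by
            simp [stepA, hM, hU, hp, push_mk]
          rw [List.foldl_cons, this, ih]
          simp [G, stA, hM, hU, hp]

theorem G_no_underscore (cs : List Char) (h : '_' ∉ cs) : ∀ p, G p cs = [] := by
  induction cs with
  | nil => intro p; simp [G]
  | cons c cs ih =>
    intro p
    have hc : c ≠ '_' := fun hc => h (hc ▸ List.mem_cons_self)
    simp [G, hc]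
    exact ih (fun hm => h (List.mem_cons_of_mem _ hm)) _

theorem foldl_stA_ne (seg : List Char) : ∀ p, p ≠ [] → seg.foldl stA p = p ++ seg := by
  induction seg with
  | nil => intro p _; simp
  | cons c seg ih =>
    intro p hp
    have : stA p c = p ++ [c] := by by_cases hM : c = 'M' <;> simp [stA, hM, hp]
    rw [List.foldl_cons, this, ih _ (by simp)]
    simp

theorem foldl_stA_nil (seg : List Char) : seg.foldl stA [] = seg.dropWhile (· ≠ 'M') := by
  induction seg with
  | nil => simp
  | cons c seg ih =>
    by_cases hM : c = 'M'
    · subst hM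
      rw [List.foldl_cons, show stA [] 'M' = ['M'] by simp [stA], foldl_stA_ne seg ['M'] (by simp)]
      simp
    · rw [List.foldl_cons, show stA [] c = [] by simp [stA, hM], ih]
      simp [hM]

theorem G_append (seg : List Char) : ∀ p cs, '_' ∉ seg → G p (seg ++ cs) = G (seg.foldl stA p) cs := by
  induction seg with
  | nil => intro p cs _; simp
  | cons c seg ih =>
    intro p cs h
    have hc : c ≠ '_' := fun hc => h (hc ▸ List.mem_cons_self)
    simp only [List.cons_append, G, if_neg hc, List.foldl_cons]
    exact ih _ _ (fun hm => h (List.mem_cons_of_mem _ hm))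

theorem singleton_prefix_iff (a : Char) (l : List Char) : [a] <+: l ↔ l.head? = some a := by
  cases l with
  | nil => simp
  | cons b t =>
    constructor
    · rintro ⟨u, hu⟩; simp at hu; simp [hu.1]
    · intro h; simp at h; exact ⟨t, by simp [h]⟩

theorem singleton_infix_iff (a : Char) (l : List Char) : [a] <:+: l ↔ a ∈ l := by
  constructor
  · intro h; exact (List.IsInfix.sublist h).subset (by simp)
  · intro h
    rcases List.append_of_mem h with ⟨s, t, rfl⟩
    exact ⟨s, t, by simp⟩

theorem dropWhile_eq_drop (l : List Char) : ∀ n : Nat, (∀ i, i < n → l[i]? ≠ some 'M') →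
    l[n]? = some 'M' → l.dropWhile (· ≠ 'M') = l.drop n := by
  induction l with
  | nil => intro n _ h; simp at h
  | cons c l ih =>
    intro n hmin hn
    cases n with
    | zero => simp at hn; simp [hn]
    | succ n =>
      have hc : c ≠ 'M' := by
        have := hmin 0 (by omega); simpa using this
      rw [List.dropWhile_cons, if_pos (by simpa using hc), List.drop_succ_cons]
      exact ih n (fun i hi => by have := hmin (i + 1) (by omega); simpa using this) (by simpa using hn)

theorem find_M_neg (seg : List Char) (h : PySem.Chars.find seg ['M'] = -1) :
    seg.dropWhile (· ≠ 'M') = [] := by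
  have : ¬ (['M'] : List Char) <:+: seg := (PySem.Chars.find_eq_neg_one_iff seg ['M']).mp h
  rw [List.dropWhile_eq_nil_iff]
  intro x hx
  simp only [decide_eq_true_eq]
  intro hxm
  exact this ((singleton_infix_iff 'M' seg).mpr (hxm ▸ hx))

theorem find_M_pos (seg : List Char) (h : ¬ PySem.Chars.find seg ['M'] = -1) :
    seg.dropWhile (· ≠ 'M') = seg.drop (PySem.Chars.find seg ['M']).toNat ∧
    seg.dropWhile (· ≠ 'M') ≠ [] := by
  have h0 : 0 ≤ PySem.Chars.find seg ['M'] := by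
    have := PySem.Chars.neg_one_le_find seg ['M']; omega
  obtain ⟨hpre, hmin⟩ := PySem.Chars.find_spec h0
  set n := (PySem.Chars.find seg ['M']).toNat with hn
  have hgn : seg[n]? = some 'M' := by
    have := (singleton_prefix_iff 'M' (seg.drop n)).mp hpre
    simpa [List.head?_drop] using this
  have hlt : ∀ i, i < n → seg[i]? ≠ some 'M' := by
    intro i hi hsome
    exact hmin i hi ((singleton_prefix_iff 'M' (seg.drop i)).mpr (by simpa [List.head?_drop] using hsome))
  have heq := dropWhile_eq_drop seg n hlt hgn
  refine ⟨heq, ?_⟩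
  rw [heq]
  intro hnil
  have : seg[n]? = none := by
    have := congrArg List.head? hnil
    simpa [List.head?_drop] using this
  simp [this] at hgn

theorem find_U_decomp (cs : List Char) (h : ¬ PySem.Chars.find cs ['_'] = -1) :
    '_' ∉ cs.take (PySem.Chars.find cs ['_']).toNat ∧
    cs = cs.take (PySem.Chars.find cs ['_']).toNat ++ '_' :: cs.drop ((PySem.Chars.find cs ['_']).toNat + 1) := by
  have h0 : 0 ≤ PySem.Chars.find cs ['_'] := by
    have := PySem.Chars.neg_one_le_find cs ['_']; omega
  obtain ⟨hpre, hmin⟩ := PySem.Chars.find_spec h0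
  set n := (PySem.Chars.find cs ['_']).toNat with hn
  have hgn : cs[n]? = some '_' := by
    have := (singleton_prefix_iff '_' (cs.drop n)).mp hpre
    simpa [List.head?_drop] using this
  have hlen : n < cs.length := by
    by_contra hge
    rw [List.getElem?_eq_none (by omega)] at hgn
    simp at hgn
  constructor
  · intro hmem
    rw [List.mem_iff_getElem] at hmem
    obtain ⟨i, hi, hgi⟩ := hmem
    have hilt : i < n := by
      have := List.length_take_le n cs
      omega
    refine hmin i hilt ((singleton_prefix_iff '_' (cs.drop i)).mpr ?_)
    rw [List.head?_drop]
    have h2 := hgi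
    rw [List.getElem_take] at h2
    rw [List.getElem?_eq_getElem (by omega)]
    simp [h2]
  · conv_lhs => rw [← List.take_append_drop n cs]
    congr 1
    rw [List.drop_eq_getElem_cons hlen]
    congr 1
    rw [List.getElem?_eq_getElem hlen] at hgn
    simpa using hgn

theorem G_eq_bgo (cs : List Char) : G [] cs = bgo cs := by
  induction cs using bgo.induct with
  | case1 rest _j hj =>
    have hj' : PySem.Chars.find rest ['_'] = -1 := hj
    rw [bgo, dif_pos hj']
    have hni : ¬ (['_'] : List Char) <:+: rest := (PySem.Chars.find_eq_neg_one_iff rest ['_']).mp hj'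
    exact G_no_underscore rest (fun hm => hni ((singleton_infix_iff '_' rest).mpr hm)) []
  | case2 rest _j hj ih =>
    have hj' : ¬ PySem.Chars.find rest ['_'] = -1 := hj
    have ih' : G [] (PySem.List.slice rest (some (PySem.Chars.find rest ['_'] + 1)) none) =
        bgo (PySem.List.slice rest (some (PySem.Chars.find rest ['_'] + 1)) none) := ih
    rw [bgo, dif_neg hj']
    have h0 : 0 ≤ PySem.Chars.find rest ['_'] := by
      have := PySem.Chars.neg_one_le_find rest ['_']; omega
    obtain ⟨hnotin, hdecomp⟩ := find_U_decomp rest hj'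
    have hseg : PySem.List.slice rest none (some (PySem.Chars.find rest ['_'])) =
        rest.take (PySem.Chars.find rest ['_']).toNat := PySem.List.slice_to rest h0
    have hrest' : PySem.List.slice rest (some (PySem.Chars.find rest ['_'] + 1)) none =
        rest.drop ((PySem.Chars.find rest ['_']).toNat + 1) := by
      rw [PySem.List.slice_from rest (a := PySem.Chars.find rest ['_'] + 1) (by omega)]
      congr 1; omega
    conv_lhs => rw [hdecomp]
    rw [G_append _ _ _ hnotin, foldl_stA_nil]
    simp only [G, reduceIte]
    rw [← hrest', ih', ← hseg]
    congr 1
    by_cases hk : PySem.Chars.find (PySem.List.slice rest none (some (PySem.Chars.find rest ['_']))) ['M'] = -1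
    · rw [find_M_neg _ hk]
      simp [hk]
    · obtain ⟨hdw, hne⟩ := find_M_pos _ hk
      rw [hdw] at hne
      rw [hdw, if_neg hne, if_neg hk]
      congr 3
      rw [PySem.List.slice_from _ (a := PySem.Chars.find (PySem.List.slice rest none (some (PySem.Chars.find rest ['_']))) ['M'])
        (by have := PySem.Chars.neg_one_le_find (PySem.List.slice rest none (some (PySem.Chars.find rest ['_']))) ['M']; omega)]

-- ===== VERDICT (by name: the statement is the Claim_ definition above) =====
theorem get_prots_spec : Claim_equal_get_prots := by
  intro amino _
  unfold Spec_get_prots get_prots get_prots_alt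
  have := foldA amino.toList [] []
  simp only [List.nil_append] at this
  rw [show ((false : Bool), ([] : List String), "") = (decide (([] : List Char) ≠ []), ([] : List String), String.ofList []) by simp, this]
  exact G_eq_bgo amino.toList
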